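-- pv_equiv track=rewrite | github.com/causaliq/causaliq-workflow | src/causaliq_pipeline/workflow.py | expand_matrix
-- ===== SOURCE A (Python) =====
-- import itertools
-- from typing import Any, Dict, List, Union
--
-- class WorkflowExecutionError(Exception):
--     """Raised when workflow execution fails."""
--
--     pass
--
-- def expand_matrix(
--     matrix: Dict[str, List[Any]]
-- ) -> List[Dict[str, Any]]:
--     """Expand matrix variables into individual job configurations.
--
--     Generates all combinations from matrix variables using cartesian
--     product. Each combination becomes a separate job configuration.
--
--     Args:
--         matrix: Dictionary mapping variable names to lists of values
--
--     Returns: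
--         List of job configurations with matrix variables expanded
--
--     Raises:
--         WorkflowExecutionError: If matrix expansion fails
--     """
--     if not matrix:
--         return [{}]
--
--     try:
--         # Get variable names and value lists
--         variables = list(matrix.keys())
--         value_lists = list(matrix.values())
--
--         # Generate cartesian product of all combinations
--         combinations = list(itertools.product(*value_lists))
--
--         # Create job configurations
--         jobs = []
--         for combination in combinations:
--             job = dict(zip(variables, combination))
--             jobs.append(job)
--
--         return jobs
--
--     except Exception as e:
--         raise WorkflowExecutionError(
--             f"Matrix expansion failed: {e}"
--         ) from e
-- ===== SOURCE B (Python) =====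
-- def expand_matrix(matrix):
--     """Expand matrix variables into job configs by an incremental fold:
--     each variable/value-list pair extends every partial job dict."""
--     if not matrix:
--         return [{}]
--     results = [{}]
--     for var, values in matrix.items():
--         results = [{**r, var: v} for r in results for v in values]
--     return results
-- ===== Notes on version B (the rewrite author's own statement) =====
-- stated objective: simpler
-- what changed: Replaces itertools.product over value tuples plus a zip/dict reassembly loop with a single incremental fold that extends every partial job dict with each variable in turn.
import Mathlib
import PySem

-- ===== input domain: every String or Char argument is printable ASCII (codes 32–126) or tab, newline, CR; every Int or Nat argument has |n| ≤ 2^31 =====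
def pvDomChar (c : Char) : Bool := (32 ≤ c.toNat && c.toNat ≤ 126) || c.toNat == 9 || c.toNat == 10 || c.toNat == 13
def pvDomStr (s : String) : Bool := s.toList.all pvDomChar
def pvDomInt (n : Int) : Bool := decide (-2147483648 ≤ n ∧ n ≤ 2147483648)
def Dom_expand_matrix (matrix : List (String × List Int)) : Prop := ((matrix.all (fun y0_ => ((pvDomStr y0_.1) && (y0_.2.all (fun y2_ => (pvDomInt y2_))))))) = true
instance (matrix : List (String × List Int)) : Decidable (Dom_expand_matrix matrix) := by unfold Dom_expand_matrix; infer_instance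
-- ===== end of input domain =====

-- B replaces itertools.product + zip/dict reassembly with one incremental fold over the
-- variable/value-list pairs; same return value, simpler decomposition.
-- ===== PORT A =====
-- itertools.product(*value_lists): leftmost list varies slowest
def pyProductInt : List (List Int) → List (List Int)
  | [] => [[]]
  | vs :: rest => vs.flatMap (fun v => (pyProductInt rest).map (fun c => v :: c))

def expand_matrix (matrix : List (String × List Int)) : List (List (String × Int)) :=
  if matrix = [] then [[]]
  else
    let vars_ := matrix.map Prod.fst
    let value_lists := matrix.map Prod.snd
    let combinations := pyProductInt value_lists
    -- jobs = []; for combination in combinations: jobs.append(dict(zip(variables, combination)))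
    combinations.foldl (fun jobs c => jobs ++ [vars_.zip c]) []

-- ===== PORT B =====
def expand_matrix_alt (matrix : List (String × List Int)) : List (List (String × Int)) :=
  if matrix = [] then [[]]
  else
    -- results = [{}]; for var, values: results = [{**r, var: v} for r in results for v in values]
    matrix.foldl
      (fun results p => results.flatMap (fun r => p.2.map (fun v => r ++ [(p.1, v)])))
      [[]]

-- ===== PRECONDITION & SPEC =====
def Spec_expand_matrix (matrix : List (String × List Int)) (out : List (List (String × Int))) : Prop := out = expand_matrix_alt matrix
instance (matrix : List (String × List Int)) (out : List (List (String × Int))) : Decidable (Spec_expand_matrix matrix out) := by unfold Spec_expand_matrix; infer_instance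

-- ===== CLAIM (what is proved, stated in full; the proofs are below) =====
def Claim_equal_expand_matrix : Prop := ∀ (matrix : List (String × List Int)), Dom_expand_matrix matrix → Spec_expand_matrix matrix (expand_matrix matrix)

-- ===== LEMMAS AND PROOFS =====

-- ===== VERDICT (by name: the statement is the Claim_ definition above) =====
lemma foldB_eq (matrix : List (String × List Int)) (acc : List (List (String × Int))) :
    matrix.foldl
      (fun results p => results.flatMap (fun r => p.2.map (fun v => r ++ [(p.1, v)])))
      acc
    = acc.flatMap (fun r =>
        (pyProductInt (matrix.map Prod.snd)).map (fun c => r ++ (matrix.map Prod.fst).zip c)) := by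
  induction matrix generalizing acc with
  | nil => simp [pyProductInt]
  | cons p rest ih =>
    simp only [List.foldl_cons, ih, pyProductInt, List.map_cons]
    simp [List.flatMap_assoc, List.map_flatMap, List.flatMap_map, List.map_map,
      Function.comp_def, List.append_assoc]

theorem expand_matrix_spec : Claim_equal_expand_matrix := by
  intro matrix _
  unfold Spec_expand_matrix expand_matrix expand_matrix_alt
  split
  · rfl
  · rw [foldB_eq, PySem.List.foldl_append_singleton_eq_map]
    simp
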